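-- pv_equiv track=rewrite | github.com/ShaoQiBNU/coin | apple.py | apple_element
-- ===== SOURCE A (Python) =====
-- def apple_element(m,n):
--
--     if n==0:
--         return 0
--
--     if m==0:
--         return 1
--
--     if m<n:
--         return apple_element(m,m)
--
--     else:
--         return apple_element(m,n-1)+apple_element(m-n,n)
-- ===== SOURCE B (Python) =====
-- def apple_element(m, n):
--     # Bottom-up DP: dp[j] = number of ways after allowing part sizes up to k.
--     if n == 0:
--         return 0
--     if m == 0:
--         return 1
--     kmax = min(m, n)
--     dp = [1] + [0] * m
--     for k in range(1, kmax + 1):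
--         for j in range(k, m + 1):
--             dp[j] += dp[j - k]
--     return dp[m]
-- ===== Notes on version B (the rewrite author's own statement) =====
-- stated objective: faster
-- what changed: Replaced A's exponential branching recursion by a bottom-up dynamic-programming table dp[j] (partitions of j into parts of size at most k), filled for k = 1..min(m,n).
import Mathlib
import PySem

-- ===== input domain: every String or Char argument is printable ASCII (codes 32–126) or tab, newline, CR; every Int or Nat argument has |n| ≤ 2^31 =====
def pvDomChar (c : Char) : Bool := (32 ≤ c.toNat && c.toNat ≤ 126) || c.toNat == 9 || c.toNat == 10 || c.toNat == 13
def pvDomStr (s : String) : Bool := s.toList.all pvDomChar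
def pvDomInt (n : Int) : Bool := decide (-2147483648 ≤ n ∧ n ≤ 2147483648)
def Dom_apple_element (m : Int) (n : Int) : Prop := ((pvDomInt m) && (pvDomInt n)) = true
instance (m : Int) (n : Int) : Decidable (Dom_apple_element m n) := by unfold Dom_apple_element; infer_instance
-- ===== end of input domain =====

-- B replaces A's exponential recursion by a bottom-up O(m*min(m,n)) DP table; same return value on all inputs where A returns.

-- ===== PORT A =====
-- A's recursion, step for step; stated on Nat (exact for the nonnegative
-- arguments the recursion is reached with inside Pre_; on negatives A raises RecursionError).
def appleRec (m n : Nat) : Int :=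
  if n = 0 then 0
  else if m = 0 then 1
  else if m < n then appleRec m m
  else appleRec m (n-1) + appleRec (m-n) n
termination_by m + n
decreasing_by all_goals omega

def apple_element (m : Int) (n : Int) : Int :=
  if n = 0 then 0
  else if m = 0 then 1
  else appleRec m.toNat n.toNat

-- ===== PORT B =====
def apple_element_alt (m : Int) (n : Int) : Int :=
  if n = 0 then 0
  else if m = 0 then 1
  else
    let kmax := min m n
    let dp0 : List Int := 1 :: List.replicate m.toNat 0
    let dp := (PySem.List.pyRange 1 (kmax+1) 1).foldl (fun dp k =>
        (PySem.List.pyRange k (m+1) 1).foldl (fun dp j =>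
          dp.set j.toNat (dp.getD j.toNat 0 + dp.getD (j - k).toNat 0)) dp) dp0
    dp.getD m.toNat 0

-- ===== PRECONDITION & SPEC =====
-- Pre_ excludes exactly the inputs on which A raises RecursionError
-- (m ≠ 0 and n ≠ 0 with m or n negative: A's recursion never terminates there).
def Pre_apple_element (m : Int) (n : Int) : Prop := (0 ≤ m ∧ 0 ≤ n) ∨ n = 0 ∨ m = 0
instance (m : Int) (n : Int) : Decidable (Pre_apple_element m n) := by
  unfold Pre_apple_element; infer_instance

def pvWitness_apple_element : Int × Int := (5, 3)

def Spec_apple_element (m : Int) (n : Int) (out : Int) : Prop := out = apple_element_alt m n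
instance (m : Int) (n : Int) (out : Int) : Decidable (Spec_apple_element m n out) := by unfold Spec_apple_element; infer_instance

-- ===== CLAIM (what is proved, stated in full; the proofs are below) =====
def Claim_equal_apple_element : Prop := ∀ (m : Int) (n : Int), Dom_apple_element m n → Pre_apple_element m n → Spec_apple_element m n (apple_element m n)

-- ===== LEMMAS AND PROOFS =====

-- number of partitions of j into parts each of size ≤ k (the value both loops compute)
def pPart : Nat → Nat → Int
  | j, 0 => if j = 0 then 1 else 0
  | j, (k+1) => pPart j k + (if k+1 ≤ j then pPart (j - (k+1)) (k+1) else 0)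
termination_by j k => (k, j)
decreasing_by all_goals (first | exact Prod.Lex.left _ _ (by omega) | exact Prod.Lex.right _ (by omega))

lemma pPart_zero_left (k : Nat) : pPart 0 k = 1 := by
  induction k with
  | zero => simp [pPart]
  | succ k ih => simp [pPart, ih]

lemma pPart_succ_of_lt (i k : Nat) (h : i < k + 1) : pPart i (k+1) = pPart i k := by
  simp [pPart, Nat.not_le.mpr h]

lemma pPart_stable (m k : Nat) (h : m ≤ k) : pPart m k = pPart m m := by
  induction k with
  | zero => interval_cases m; rfl
  | succ k ih =>
    rcases Nat.lt_or_ge m (k+1) with hm | hm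
    · rw [pPart_succ_of_lt m k hm, ih (by omega)]
    · have : m = k + 1 := by omega
      subst this; rfl

lemma appleRec_eq_pPart (m n : Nat) (hn : 1 ≤ n) : appleRec m n = pPart m n := by
  induction hs : m + n using Nat.strong_induction_on generalizing m n with
  | _ s ih =>
  subst hs
  rw [appleRec]
  have hn0 : ¬ (n = 0) := by omega
  rw [if_neg hn0]
  by_cases hm : m = 0
  · subst hm; simp [pPart_zero_left]
  · rw [if_neg hm]
    by_cases hlt : m < n
    · rw [if_pos hlt]
      have h1 : appleRec m m = pPart m m :=
        ih (m + m) (by omega) m m (by omega) rfl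
      rw [h1]
      exact (pPart_stable m n (by omega)).symm
    · rw [if_neg hlt]
      have hge : n ≤ m := by omega
      have h2 : appleRec (m - n) n = pPart (m - n) n :=
        ih (m - n + n) (by omega) (m - n) n hn rfl
      have h1 : appleRec m (n-1) = pPart m (n-1) := by
        rcases Nat.eq_or_lt_of_le hn with h | h
        · have hn1 : n - 1 = 0 := by omega
          rw [hn1, show appleRec m 0 = 0 from by rw [appleRec]; simp]
          simp [pPart, hm]
        · exact ih (m + (n-1)) (by omega) m (n-1) (by omega) rfl
      have hpn : pPart m n = pPart m (n-1) + pPart (m - n) n := by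
        obtain ⟨k, rfl⟩ : ∃ k, n = k + 1 := ⟨n - 1, by omega⟩
        conv_lhs => rw [pPart]
        rw [if_pos hge]
        simp only [Nat.add_sub_cancel]
      rw [h1, h2]
      exact hpn.symm

-- getD facts for the in-place updates
lemma getD_set_self (dp : List Int) (t : Nat) (v : Int) (h : t < dp.length) :
    (dp.set t v).getD t 0 = v := by
  simp [List.getD_eq_getElem?_getD, h]

lemma getD_set_ne (dp : List Int) (t i : Nat) (v : Int) (h : t ≠ i) :
    (dp.set t v).getD i 0 = dp.getD i 0 := by
  simp [List.getD_eq_getElem?_getD, List.getElem?_set_ne h]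

lemma dp0_getD (M i : Nat) : ((1 : Int) :: List.replicate M 0).getD i 0 = pPart i 0 := by
  cases i with
  | zero => simp [pPart]
  | succ i =>
    simp only [List.getD_cons_succ, pPart]
    simp [List.getD_eq_getElem?_getD, List.getElem?_replicate]
    split <;> simp

lemma innerLoop (M k : Nat) (hk : 1 ≤ k) :
    ∀ (d t : Nat) (dp : List Int), M + 1 - t = d → k ≤ t →
    dp.length = M + 1 →
    (∀ i, i < t → dp.getD i 0 = pPart i k) →
    (∀ i, t ≤ i → i ≤ M → dp.getD i 0 = pPart i (k-1)) →
    (((PySem.List.pyRange (t:Int) ((M:Int)+1) 1).foldl (fun dp j =>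
        dp.set j.toNat (dp.getD j.toNat 0 + dp.getD (j - (k:Int)).toNat 0)) dp).length = M + 1 ∧
     ∀ i, i ≤ M → ((PySem.List.pyRange (t:Int) ((M:Int)+1) 1).foldl (fun dp j =>
        dp.set j.toNat (dp.getD j.toNat 0 + dp.getD (j - (k:Int)).toNat 0)) dp).getD i 0 = pPart i k) := by
  intro d
  induction d with
  | zero =>
    intro t dp hd hkt hlen h1 h2
    have hnil : PySem.List.pyRange (t:Int) ((M:Int)+1) 1 = [] :=
      PySem.List.pyRange_one_eq_nil (by omega)
    rw [hnil]
    exact ⟨hlen, fun i hi => h1 i (by omega)⟩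
  | succ d ihd =>
    intro t dp hd hkt hlen h1 h2
    have htM : t ≤ M := by omega
    have hcons : PySem.List.pyRange (t:Int) ((M:Int)+1) 1
        = (t:Int) :: PySem.List.pyRange ((t:Int)+1) ((M:Int)+1) 1 :=
      PySem.List.pyRange_one_cons (by omega)
    rw [hcons, List.foldl_cons]
    have hsub : ((t:Int) - (k:Int)).toNat = t - k := by omega
    have htn : ((t:Int)).toNat = t := by omega
    set v : Int := dp.getD (t:Int).toNat 0 + dp.getD ((t:Int) - (k:Int)).toNat 0 with hv
    have hvval : v = pPart t k := by
      rw [hv, htn, hsub]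
      have ha : dp.getD t 0 = pPart t (k-1) := h2 t le_rfl htM
      have hb : dp.getD (t-k) 0 = pPart (t-k) k := h1 (t-k) (by omega)
      obtain ⟨k', rfl⟩ : ∃ k', k = k' + 1 := ⟨k - 1, by omega⟩
      simp only [Nat.add_sub_cancel] at ha
      rw [ha, hb]
      conv_rhs => rw [pPart]
      rw [if_pos hkt]
    have hcast : (t:Int) + 1 = ((t+1 : Nat) : Int) := by push_cast; ring
    rw [hcast]
    refine ihd (t+1) (dp.set (t:Int).toNat v) (by omega) (by omega) (by simp [hlen]) ?_ ?_
    · intro i hi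
      rcases Nat.lt_or_ge i t with h | h
      · rw [htn, getD_set_ne dp t i v (by omega)]; exact h1 i h
      · have : i = t := by omega
        subst this
        rw [htn, getD_set_self dp i v (by omega), hvval]
    · intro i hti hiM
      rw [htn, getD_set_ne dp t i v (by omega)]
      exact h2 i (by omega) hiM

def outerF (M : Nat) (K : Int) : List Int :=
  (PySem.List.pyRange 1 (K+1) 1).foldl (fun dp k =>
    (PySem.List.pyRange k ((M:Int)+1) 1).foldl (fun dp j =>
      dp.set j.toNat (dp.getD j.toNat 0 + dp.getD (j - k).toNat 0)) dp)
    ((1 : Int) :: List.replicate M 0)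

lemma outerLoop (M K : Nat) (hK : K ≤ M) :
    (outerF M K).length = M + 1 ∧ ∀ i, i ≤ M → (outerF M K).getD i 0 = pPart i K := by
  induction K with
  | zero =>
    unfold outerF
    rw [show ((0:Nat):Int) + 1 = 1 by norm_num, PySem.List.pyRange_one_eq_nil le_rfl]
    exact ⟨by simp, fun i _ => dp0_getD M i⟩
  | succ K ih =>
    unfold outerF at ih ⊢
    have hsplit : PySem.List.pyRange 1 (((K+1 : Nat):Int)+1) 1
        = PySem.List.pyRange 1 ((K:Int)+1) 1 ++ [(K:Int)+1] := by
      have := PySem.List.pyRange_one_succ_right (a := 1) (b := (K:Int)+1) (by omega)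
      rw [← this]; norm_num
    rw [hsplit, List.foldl_append, List.foldl_cons, List.foldl_nil]
    obtain ⟨hlen, hvals⟩ := ih (by omega)
    have hcast : (K:Int) + 1 = ((K+1 : Nat) : Int) := by push_cast; ring
    rw [hcast]
    have := innerLoop M (K+1) (by omega) (M + 1 - (K+1)) (K+1)
      ((PySem.List.pyRange 1 ((K:Int)+1) 1).foldl (fun dp k =>
        (PySem.List.pyRange k ((M:Int)+1) 1).foldl (fun dp j =>
          dp.set j.toNat (dp.getD j.toNat 0 + dp.getD (j - k).toNat 0)) dp)
      ((1 : Int) :: List.replicate M 0)) rfl le_rfl hlen ?_ ?_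
    · exact ⟨this.1, fun i hi => this.2 i hi⟩
    · intro i hi
      rw [pPart_succ_of_lt i K hi]
      exact hvals i (by omega)
    · intro i hti hiM
      simpa using hvals i hiM

lemma alt_eq_pPart (M N : Nat) (hM : 1 ≤ M) (hN : 1 ≤ N) :
    apple_element_alt (M : Int) (N : Int) = pPart M N := by
  have hn0 : ((N:Int)) ≠ 0 := by omega
  have hm0 : ((M:Int)) ≠ 0 := by omega
  have hmin : min ((M:Nat):Int) ((N:Nat):Int) = ((min M N : Nat) : Int) :=
    (Nat.cast_min M N).symm
  have htn : (((M:Nat):Int)).toNat = M := by omega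
  simp only [apple_element_alt, if_neg hn0, if_neg hm0, hmin, htn]
  have hres : (outerF M ((min M N : Nat):Int)).getD M 0 = pPart M (min M N) :=
    (outerLoop M (min M N) (by omega)).2 M le_rfl
  rw [show ((min M N : Nat):Int) = ((min M N : Nat):Int) + 1 - 1 by ring] at hres
  rw [outerF] at hres
  simp only [add_sub_cancel_right] at hres
  rw [hres]
  rcases Nat.le_total N M with h | h
  · rw [Nat.min_eq_right h]
  · rw [Nat.min_eq_left h]
    exact (pPart_stable M N h).symm

-- ===== VERDICT (by name: the statement is the Claim_ definition above) =====
theorem apple_element_spec : Claim_equal_apple_element := by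
  intro m n _ hpre
  unfold Spec_apple_element
  by_cases hn : n = 0
  · simp [apple_element, apple_element_alt, hn]
  · by_cases hm : m = 0
    · simp [apple_element, apple_element_alt, hn, hm]
    · have hmn : 0 < m ∧ 0 < n := by
        rcases hpre with ⟨h1, h2⟩ | h | h <;> omega
      obtain ⟨hm1, hn1⟩ := hmn
      have hmc : m = ((m.toNat : Nat) : Int) := by omega
      have hnc : n = ((n.toNat : Nat) : Int) := by omega
      have halt : apple_element_alt m n = pPart m.toNat n.toNat := by
        conv_lhs => rw [hmc, hnc]
        exact alt_eq_pPart m.toNat n.toNat (by omega) (by omega)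
      rw [apple_element, if_neg hn, if_neg hm,
          appleRec_eq_pPart m.toNat n.toNat (by omega), halt]
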